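-- pv_equiv track=rewrite | github.com/cda-tum/mqt-qudits | src/mqt/qudits/core/level_graph.py | update_list
-- ===== SOURCE A (Python) =====
-- from typing import TYPE_CHECKING, TypeVar, Union, cast
--
-- def update_list(lst_: list[tuple[int, int]], num_a: int, num_b: int) -> list[tuple[int, int]]:
--     new_lst: list[tuple[int, int]] = []
--
--     mod_index = []
--     for t in lst_:
--         tupla = [0, 0]
--         if t[0] == num_a:
--             tupla[0] = 1
--         elif t[0] == num_b:
--             tupla[0] = 2
--
--         if t[1] == num_a:
--             tupla[1] = 1
--         elif t[1] == num_b: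
--             tupla[1] = 2
--
--         mod_index.append(tupla)
--
--     for i, t in enumerate(lst_):
--         substituter: list[int] = list(t)
--         if mod_index[i][0] == 1:
--             substituter[0] = num_b
--         elif mod_index[i][0] == 2:
--             substituter[0] = num_a
--         if mod_index[i][1] == 1:
--             substituter[1] = num_b
--         elif mod_index[i][1] == 2:
--             substituter[1] = num_a
--         new_lst.append(cast("tuple[int, int]", tuple(substituter)))
--
--     return new_lst
-- ===== SOURCE B (Python) =====
-- def update_list(lst_, num_a, num_b):
--     # Sentinel-rename algorithm: pick a fresh value tmp strictly greater than every
--     # value in play, then do three global renames over the whole list: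
--     # num_a -> tmp, num_b -> num_a, tmp -> num_b.  Correct because tmp collides
--     # with nothing, so the classic temp-variable swap applies value-wise.
--     tmp = max([num_a, num_b] + [x for t in lst_ for x in t]) + 1
--     out = [(tmp if a == num_a else a, tmp if b == num_a else b) for a, b in lst_]
--     out = [(num_a if a == num_b else a, num_a if b == num_b else b) for a, b in out]
--     out = [(num_b if a == tmp else a, num_b if b == tmp else b) for a, b in out]
--     return out
-- ===== Notes on version B (the rewrite author's own statement) =====
-- stated objective: alternative
-- what changed: Replaced A's per-element two-pass code-table substitution by a sentinel-rename algorithm: compute a fresh value above the data maximum, then perform three global rename passes (num_a->tmp, num_b->num_a, tmp->num_b), the classic temp-variable swap lifted to the whole list.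
import Mathlib
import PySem

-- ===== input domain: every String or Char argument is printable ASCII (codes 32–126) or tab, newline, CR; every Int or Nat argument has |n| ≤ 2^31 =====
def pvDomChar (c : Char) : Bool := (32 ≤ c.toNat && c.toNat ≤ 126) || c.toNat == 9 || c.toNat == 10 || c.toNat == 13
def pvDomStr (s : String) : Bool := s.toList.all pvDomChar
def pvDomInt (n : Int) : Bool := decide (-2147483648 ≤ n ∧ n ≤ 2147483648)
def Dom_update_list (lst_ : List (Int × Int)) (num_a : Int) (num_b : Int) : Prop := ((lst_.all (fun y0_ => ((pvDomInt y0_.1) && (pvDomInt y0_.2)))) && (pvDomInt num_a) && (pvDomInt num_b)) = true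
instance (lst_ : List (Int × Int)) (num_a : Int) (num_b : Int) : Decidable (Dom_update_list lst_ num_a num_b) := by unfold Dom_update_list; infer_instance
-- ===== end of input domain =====

-- B replaces A's per-element code-table substitution by a sentinel-rename algorithm:
-- a fresh value above the data maximum, then three global rename passes
-- (num_a->tmp, num_b->num_a, tmp->num_b) — the temp-variable swap lifted to the list
-- (objective: alternative).
-- ===== PORT A =====
def update_list (lst_ : List (Int × Int)) (num_a : Int) (num_b : Int) : List (Int × Int) :=
  let mod_index : List (Int × Int) := lst_.foldl (fun acc t =>
    let c0 : Int := if t.1 = num_a then 1 else if t.1 = num_b then 2 else 0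
    let c1 : Int := if t.2 = num_a then 1 else if t.2 = num_b then 2 else 0
    acc ++ [(c0, c1)]) []
  (PySem.List.enumerate lst_).foldl (fun acc it =>
    let m := PySem.List.pyGetD mod_index it.1 (0, 0)
    let s0 : Int := if m.1 = 1 then num_b else if m.1 = 2 then num_a else it.2.1
    let s1 : Int := if m.2 = 1 then num_b else if m.2 = 2 then num_a else it.2.2
    acc ++ [(s0, s1)]) []

-- ===== PORT B =====
-- Python's max([num_a, num_b] + flat) on a nonempty int list is ported as the
-- left fold of max starting from the first element (exact for integers).
def update_list_alt (lst_ : List (Int × Int)) (num_a : Int) (num_b : Int) : List (Int × Int) :=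
  let flat : List Int := lst_.flatMap (fun t => [t.1, t.2])
  let tmp : Int := (num_b :: flat).foldl max num_a + 1
  let p1 := lst_.map (fun t =>
    ((if t.1 = num_a then tmp else t.1), (if t.2 = num_a then tmp else t.2)))
  let p2 := p1.map (fun t =>
    ((if t.1 = num_b then num_a else t.1), (if t.2 = num_b then num_a else t.2)))
  p2.map (fun t =>
    ((if t.1 = tmp then num_b else t.1), (if t.2 = tmp then num_b else t.2)))

-- ===== PRECONDITION & SPEC =====
def Spec_update_list (lst_ : List (Int × Int)) (num_a : Int) (num_b : Int) (out : List (Int × Int)) : Prop := out = update_list_alt lst_ num_a num_b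
instance (lst_ : List (Int × Int)) (num_a : Int) (num_b : Int) (out : List (Int × Int)) : Decidable (Spec_update_list lst_ num_a num_b out) := by unfold Spec_update_list; infer_instance

-- ===== CLAIM (what is proved, stated in full; the proofs are below) =====
def Claim_equal_update_list : Prop := ∀ (lst_ : List (Int × Int)) (num_a : Int) (num_b : Int), Dom_update_list lst_ num_a num_b → Spec_update_list lst_ num_a num_b (update_list lst_ num_a num_b)

-- ===== LEMMAS AND PROOFS =====

-- the pointwise swap both programs implement
def pvSwap (num_a num_b v : Int) : Int :=
  if v = num_a then num_b else if v = num_b then num_a else v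

lemma le_foldl_max (l : List Int) (b : Int) : b ≤ l.foldl max b := by
  induction l generalizing b with
  | nil => simp
  | cons h t ih => exact le_trans (le_max_left b h) (ih (max b h))

lemma mem_le_foldl_max (l : List Int) (b x : Int) (hx : x ∈ l) : x ≤ l.foldl max b := by
  induction l generalizing b with
  | nil => simp at hx
  | cons h t ih =>
    rcases List.mem_cons.mp hx with rfl | hx
    · exact le_trans (le_max_right b x) (le_foldl_max t (max b x))
    · exact ih (max b h) hx

-- A equals the pointwise swap
lemma update_list_eq_swap (lst_ : List (Int × Int)) (num_a num_b : Int) :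
    update_list lst_ num_a num_b
      = lst_.map (fun t => (pvSwap num_a num_b t.1, pvSwap num_a num_b t.2)) := by
  unfold update_list
  rw [PySem.List.foldl_append_singleton_eq_map, List.nil_append,
    PySem.List.foldl_append_singleton_eq_map, List.nil_append]
  apply List.ext_getElem
  · simp [PySem.List.length_enumerate]
  · intro i h1 h2
    simp only [List.getElem_map, PySem.List.getElem_enumerate]
    have hi : i < lst_.length := by simpa [PySem.List.length_enumerate] using h1
    have hm : PySem.List.pyGetD
        (lst_.map (fun t => ((if t.1 = num_a then (1:Int) else if t.1 = num_b then 2 else 0),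
          (if t.2 = num_a then (1:Int) else if t.2 = num_b then 2 else 0)))) ((0:Int) + i) (0, 0)
        = ((if lst_[i].1 = num_a then (1:Int) else if lst_[i].1 = num_b then 2 else 0),
          (if lst_[i].2 = num_a then (1:Int) else if lst_[i].2 = num_b then 2 else 0)) := by
      rw [show ((0:Int) + i) = (i:Int) by simp, PySem.List.pyGetD_natCast]
      simp [hi]
    rw [hm]
    unfold pvSwap
    by_cases h0a : lst_[i].1 = num_a <;> by_cases h0b : lst_[i].1 = num_b <;>
      by_cases h1a : lst_[i].2 = num_a <;> by_cases h1b : lst_[i].2 = num_b <;>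
      simp [h0a, h0b, h1a, h1b]

-- the three renames compose to the swap, for any value bounded by the maximum
lemma rename3_eq_swap (na nb M v : Int) (hna : na ≤ M) (hnb : nb ≤ M) (hv : v ≤ M) :
    (if (if (if v = na then M + 1 else v) = nb then na else if v = na then M + 1 else v) = M + 1
      then nb
      else if (if v = na then M + 1 else v) = nb then na else if v = na then M + 1 else v)
    = pvSwap na nb v := by
  unfold pvSwap
  split_ifs <;> omega

-- B equals the pointwise swap
lemma update_list_alt_eq_swap (lst_ : List (Int × Int)) (num_a num_b : Int) :
    update_list_alt lst_ num_a num_b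
      = lst_.map (fun t => (pvSwap num_a num_b t.1, pvSwap num_a num_b t.2)) := by
  unfold update_list_alt
  simp only [List.map_map]
  apply List.map_congr_left
  intro t ht
  set M : Int := ((num_b :: lst_.flatMap (fun t => [t.1, t.2])).foldl max num_a) with hM
  have hna : num_a ≤ M := le_foldl_max _ _
  have hnb : num_b ≤ M := mem_le_foldl_max _ _ _ (List.mem_cons_self)
  have h1 : t.1 ≤ M := mem_le_foldl_max _ _ _ (by
    exact List.mem_cons_of_mem _ (List.mem_flatMap.mpr ⟨t, ht, by simp⟩))
  have h2 : t.2 ≤ M := mem_le_foldl_max _ _ _ (by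
    exact List.mem_cons_of_mem _ (List.mem_flatMap.mpr ⟨t, ht, by simp⟩))
  simp only [Function.comp]
  exact Prod.ext (rename3_eq_swap num_a num_b M t.1 hna hnb h1)
    (rename3_eq_swap num_a num_b M t.2 hna hnb h2)

-- ===== VERDICT (by name: the statement is the Claim_ definition above) =====
theorem update_list_spec : Claim_equal_update_list := by
  intro lst_ num_a num_b _
  unfold Spec_update_list
  rw [update_list_eq_swap, update_list_alt_eq_swap]
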